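-- pv_equiv track=rewrite | github.com/reyhaneshahrokhian/CS224N-NLP | a1/a1.py | distinct_words
-- ===== SOURCE A (Python) =====
-- def distinct_words(corpus):
--     """ Determine a list of distinct words for the corpus.
--         Params:
--             corpus (list of list of strings): corpus of documents
--         Return:
--             corpus_words (list of strings): sorted list of distinct words across the corpus
--             n_corpus_words (integer): number of distinct words across the corpus
--     """
--     corpus_words = []
--     n_corpus_words = -1
--
--     ### SOLUTION BEGIN
--     distinct_words = set()
--     for snt in corpus:
--         for word in snt:
--             distinct_words.add(word)
--
--     corpus_words = sorted(list(distinct_words))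
--     ### SOLUTION END
--
--     return corpus_words, len(corpus_words)
-- ===== SOURCE B (Python) =====
-- def distinct_words(corpus):
--     """ Determine a list of distinct words for the corpus.
--         Sort the full duplicate-bearing word list, then drop adjacent duplicates
--         in one scan (no hash set)."""
--     words = []
--     for snt in corpus:
--         words += snt
--     words.sort()
--     corpus_words = []
--     for w in words:
--         if not corpus_words or corpus_words[-1] != w:
--             corpus_words.append(w)
--     return corpus_words, len(corpus_words)
-- ===== Notes on version B (the rewrite author's own statement) =====
-- stated objective: alternative
-- what changed: B flattens the corpus into one list with duplicates, sorts that full list, and removes adjacent duplicates with a previous-element scan, instead of A's hash-set dedup followed by sorting the distinct words.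
import Mathlib
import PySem

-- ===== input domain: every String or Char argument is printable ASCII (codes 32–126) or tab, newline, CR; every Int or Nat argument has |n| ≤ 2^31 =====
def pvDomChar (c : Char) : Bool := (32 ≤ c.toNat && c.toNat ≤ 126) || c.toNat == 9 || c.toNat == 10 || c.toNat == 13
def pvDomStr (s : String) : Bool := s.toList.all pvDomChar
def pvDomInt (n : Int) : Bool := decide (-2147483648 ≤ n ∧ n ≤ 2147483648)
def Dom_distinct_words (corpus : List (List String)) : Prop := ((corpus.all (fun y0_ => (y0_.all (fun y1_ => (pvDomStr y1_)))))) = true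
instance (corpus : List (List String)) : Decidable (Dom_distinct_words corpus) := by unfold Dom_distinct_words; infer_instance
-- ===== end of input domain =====

-- B replaces A's hash-set dedup + sort by sort-the-full-list + adjacent-duplicate removal (alternative decomposition, same result).
-- ===== PORT A =====
def distinct_words (corpus : List (List String)) : List String × Int :=
  let dw := corpus.foldl (fun s snt => snt.foldl PySem.Set.add s) PySem.Set.empty
  let corpus_words := PySem.List.sorted dw (fun x => x) false
  (corpus_words, (corpus_words.length : Int))

-- ===== PORT B =====
-- one step of B's scan: append w only when it differs from the last appended word
def dwStep (acc : List String) (w : String) : List String :=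
  match acc.getLast? with
  | none => [w]
  | some p => if p = w then acc else acc ++ [w]

def distinct_words_alt (corpus : List (List String)) : List String × Int :=
  let words := corpus.foldl (fun acc snt => acc ++ snt) []
  let ss := PySem.List.sorted words (fun x => x) false
  let corpus_words := ss.foldl dwStep []
  (corpus_words, (corpus_words.length : Int))

-- ===== PRECONDITION & SPEC =====
def Spec_distinct_words (corpus : List (List String)) (out : List String × Int) : Prop := out = distinct_words_alt corpus
instance (corpus : List (List String)) (out : List String × Int) : Decidable (Spec_distinct_words corpus out) := by unfold Spec_distinct_words; infer_instance

-- ===== CLAIM (what is proved, stated in full; the proofs are below) =====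
def Claim_equal_distinct_words : Prop := ∀ (corpus : List (List String)), Dom_distinct_words corpus → Spec_distinct_words corpus (distinct_words corpus)

-- ===== LEMMAS AND PROOFS =====

-- the last element of a strictly increasing list bounds every element
lemma last_max (acc : List String) (h : acc.Pairwise (· < ·)) (p : String)
    (hl : acc.getLast? = some p) : ∀ a ∈ acc, a ≤ p := by
  induction acc with
  | nil => simp at hl
  | cons x t ih =>
    intro a ha
    cases t with
    | nil =>
      simp at hl ha
      simp [ha, hl]
    | cons y u =>
      rw [List.getLast?_cons_cons] at hl
      rcases List.mem_cons.mp ha with rfl | hat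
      · have hp : p ∈ y :: u := List.mem_of_getLast? hl
        exact le_of_lt ((List.pairwise_cons.mp h).1 p hp)
      · exact ih (List.pairwise_cons.mp h).2 hl a hat

-- invariant of B's adjacent-dedup scan
lemma ded_inv (ss : List String) : ∀ (acc : List String),
    ss.Pairwise (· ≤ ·) → acc.Pairwise (· < ·) →
    (∀ a ∈ acc, ∀ b ∈ ss, a ≤ b) →
    (ss.foldl dwStep acc).Pairwise (· < ·) ∧
      ∀ x, x ∈ ss.foldl dwStep acc ↔ x ∈ acc ∨ x ∈ ss := by
  induction ss with
  | nil => intro acc _ hacc _; simpa using hacc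
  | cons w rest ih =>
    intro acc hss hacc hord
    have hwrest : ∀ b ∈ rest, w ≤ b := (List.pairwise_cons.mp hss).1
    have hrest : rest.Pairwise (· ≤ ·) := (List.pairwise_cons.mp hss).2
    simp only [List.foldl_cons]
    cases hl : acc.getLast? with
    | none =>
      have hnil : acc = [] := List.getLast?_eq_none_iff.mp hl
      have hstep : dwStep acc w = [w] := by simp [dwStep, hl]
      rw [hstep]
      obtain ⟨h1, h2⟩ := ih [w] hrest (by simp)
        (by intro a ha b hb; simp at ha; subst ha; exact hwrest b hb)
      refine ⟨h1, fun x => ?_⟩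
      rw [h2 x]; subst hnil; simp
    | some p =>
      have hmax := last_max acc hacc p hl
      have hp : p ∈ acc := List.mem_of_getLast? hl
      by_cases hpw : p = w
      · have hstep : dwStep acc w = acc := by simp [dwStep, hl, hpw]
        rw [hstep]
        obtain ⟨h1, h2⟩ := ih acc hrest hacc
          (fun a ha b hb => hord a ha b (List.mem_cons_of_mem _ hb))
        refine ⟨h1, fun x => ?_⟩
        rw [h2 x]
        constructor
        · tauto
        · rintro (hx | hx)
          · exact Or.inl hx
          · rcases List.mem_cons.mp hx with rfl | hx
            · exact Or.inl (hpw ▸ hp)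
            · exact Or.inr hx
      · have hstep : dwStep acc w = acc ++ [w] := by simp [dwStep, hl, hpw]
        rw [hstep]
        have hplt : p < w :=
          lt_of_le_of_ne (hord p hp w (List.mem_cons_self ..)) hpw
        have haccw : ∀ a ∈ acc, a < w := fun a ha => lt_of_le_of_lt (hmax a ha) hplt
        obtain ⟨h1, h2⟩ := ih (acc ++ [w]) hrest
          (by
            rw [List.pairwise_append]
            exact ⟨hacc, by simp, by simpa using haccw⟩)
          (by
            intro a ha b hb
            rcases List.mem_append.mp ha with ha | ha
            · exact hord a ha b (List.mem_cons_of_mem _ hb)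
            · simp at ha; subst ha; exact hwrest b hb)
        refine ⟨h1, fun x => ?_⟩
        rw [h2 x]; simp; tauto

-- membership in A's accumulated set
lemma mem_buildSet (corpus : List (List String)) : ∀ (s : PySem.Set String) (x : String),
    (x ∈ corpus.foldl (fun s snt => snt.foldl PySem.Set.add s) s) ↔
      (x ∈ s ∨ ∃ snt ∈ corpus, x ∈ snt) := by
  induction corpus with
  | nil => simp
  | cons snt rest ih =>
    intro s x
    simp only [List.foldl_cons]
    rw [ih]
    have h : snt.foldl PySem.Set.add s = PySem.Set.update s snt := rfl
    rw [h]
    simp only [PySem.Set.mem_update, List.mem_cons]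
    constructor
    · rintro ((h | h) | ⟨t, ht, hx⟩)
      · exact Or.inl h
      · exact Or.inr ⟨snt, Or.inl rfl, h⟩
      · exact Or.inr ⟨t, Or.inr ht, hx⟩
    · rintro (h | ⟨t, (rfl | ht), hx⟩)
      · exact Or.inl (Or.inl h)
      · exact Or.inl (Or.inr hx)
      · exact Or.inr ⟨t, ht, hx⟩

-- A's accumulated set has no duplicates
lemma nodup_buildSet (corpus : List (List String)) : ∀ (s : PySem.Set String),
    s.Nodup → (corpus.foldl (fun s snt => snt.foldl PySem.Set.add s) s).Nodup := by
  induction corpus with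
  | nil => intro s h; simpa using h
  | cons snt rest ih =>
    intro s hs
    refine ih _ ?_
    induction snt generalizing s with
    | nil => simpa using hs
    | cons w ws ihw => exact ihw _ (PySem.Set.nodup_add _ _ hs)

-- ===== VERDICT (by name: the statement is the Claim_ definition above) =====
theorem distinct_words_spec : Claim_equal_distinct_words := by
  intro corpus _
  unfold Spec_distinct_words distinct_words distinct_words_alt
  set S := corpus.foldl (fun s snt => snt.foldl PySem.Set.add s) PySem.Set.empty with hS
  set flat := corpus.foldl (fun acc snt => acc ++ snt) [] with hflat
  set ss := PySem.List.sorted flat (fun x => x) false with hss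
  set D := ss.foldl dwStep [] with hD
  obtain ⟨hDlt, hDmem⟩ := ded_inv ss []
    (PySem.List.sorted_pairwise flat (fun x => x))
    (by simp) (by simp)
  have hmemD : ∀ x, x ∈ D ↔ ∃ snt ∈ corpus, x ∈ snt := by
    intro x
    rw [hD, hDmem x]
    simp [hss, PySem.List.mem_sorted, hflat,
      PySem.List.foldl_append_eq_flatMap (g := fun s => s)]
  have hmemS : ∀ x, x ∈ S ↔ ∃ snt ∈ corpus, x ∈ snt := by
    intro x
    rw [hS, mem_buildSet]
    simp [PySem.Set.empty]
  have hSnodup : S.Nodup := nodup_buildSet corpus PySem.Set.empty (by simp [PySem.Set.empty])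
  have hDnodup : D.Nodup := hDlt.imp ne_of_lt
  have hperm : D.Perm S :=
    (List.perm_ext_iff_of_nodup hDnodup hSnodup).mpr
      (fun x => (hmemD x).trans (hmemS x).symm)
  have hsorted : PySem.List.sorted S (fun x => x) false = D :=
    PySem.List.sorted_eq_of_perm_of_pairwise_lt S D (fun x => x) hperm hDlt
  simp only [hsorted]
  rfl
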